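-- pv_equiv track=rewrite | github.com/janelia-flyem/tensorstore-export | src/ng_sharding.py | compressed_z_index
-- ===== SOURCE A (Python) =====
-- from typing import Dict, List, Sequence, Tuple
--
-- def compressed_z_index(
--     coords: Sequence[int], coord_bits: Sequence[int]
-- ) -> int:
--     """Compressed Z-index matching TensorStore's EncodeCompressedZIndex.
--
--     Unlike a standard Morton code, the compressed variant only interleaves
--     bits for dimensions that still have significant bits at each level.
--
--     Args:
--         coords: (x, y, z) chunk grid coordinates.
--         coord_bits: (bx, by, bz) number of bits per dimension,
--                     from get_compressed_z_index_bits().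
--
--     Returns:
--         The compressed Z-index (uint64).
--     """
--     max_bit = max(coord_bits)
--     code = 0
--     j = 0
--     for bit in range(max_bit):
--         for dim in range(3):
--             if bit < coord_bits[dim]:
--                 code |= ((coords[dim] >> bit) & 1) << j
--                 j += 1
--     return code
-- ===== SOURCE B (Python) =====
-- def compressed_z_index(coords, coord_bits):
--     max_bit = max(coord_bits)
--     # Stage 1: prefix[level] = total number of output bits consumed by all levels < level.
--     prefix = [0]
--     for level in range(max_bit):
--         prefix.append(prefix[-1] + sum(1 for cb in coord_bits[:3] if cb > level))
--     # Stage 2: dim-major placement; each bit's output position is derived arithmetically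
--     # (positions are pairwise distinct, so independent additions assemble the code).
--     code = 0
--     for dim, cb in enumerate(coord_bits[:3]):
--         for bit in range(cb):
--             pos = prefix[bit] + sum(1 for d in range(dim) if coord_bits[d] > bit)
--             code += ((coords[dim] >> bit) & 1) << pos
--     return code
-- ===== Notes on version B (the rewrite author's own statement) =====
-- stated objective: alternative
-- what changed: B replaces A's level-major interleaving with a shared running output-position counter j by two staged passes: it first builds a prefix-sum array of per-level active-dimension counts, then iterates dim-major, deriving each bit's output position arithmetically (prefix[bit] plus the count of lower-indexed dimensions active at that level) and adding the independently placed bits.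
import Mathlib
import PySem

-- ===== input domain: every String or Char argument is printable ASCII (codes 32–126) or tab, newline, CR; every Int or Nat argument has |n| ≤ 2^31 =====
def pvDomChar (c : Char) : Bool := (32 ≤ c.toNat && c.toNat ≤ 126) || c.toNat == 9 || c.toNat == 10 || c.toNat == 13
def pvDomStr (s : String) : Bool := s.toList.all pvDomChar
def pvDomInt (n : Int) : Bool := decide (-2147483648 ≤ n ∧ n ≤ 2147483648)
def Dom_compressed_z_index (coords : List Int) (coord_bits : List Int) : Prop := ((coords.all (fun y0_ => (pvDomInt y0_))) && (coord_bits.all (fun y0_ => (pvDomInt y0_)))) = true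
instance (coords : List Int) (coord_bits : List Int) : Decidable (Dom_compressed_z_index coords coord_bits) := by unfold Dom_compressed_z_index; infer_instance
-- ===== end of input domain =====

-- B replaces A's level-major interleaving with a shared running position counter j by two staged
-- passes: a prefix-sum array of per-level active-dimension counts, then a dim-major loop that
-- derives each bit's output position arithmetically and adds the placed bits independently
-- (objective: alternative decomposition, same asymptotic cost).

-- ===== PORT A =====
def compressed_z_index (coords : List Int) (coord_bits : List Int) : Int :=
  -- max(coord_bits): Python raises ValueError on []; Pre_ excludes that, the .getD 0 default is dead there
  let max_bit : Int := (PySem.List.max? coord_bits (fun x => x)).getD 0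
  let s := (PySem.List.pyRange 0 max_bit 1).foldl (fun (cj : Int × Int) bit =>
    (PySem.List.pyRange 0 3 1).foldl (fun (cj : Int × Int) dim =>
      if bit < PySem.List.pyGetD coord_bits dim 0 then
        -- coord_bits[dim] / coords[dim]: IndexError excluded by Pre_, default 0 dead there
        (PySem.Int.bor cj.1
           ((PySem.Int.band ((PySem.List.pyGetD coords dim 0) >>> bit.toNat) 1) <<< cj.2.toNat),
         cj.2 + 1)
      else cj) cj) ((0 : Int), (0 : Int))
  s.1

-- ===== PORT B =====
def compressed_z_index_alt (coords : List Int) (coord_bits : List Int) : Int :=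
  let max_bit : Int := (PySem.List.max? coord_bits (fun x => x)).getD 0
  -- stage 1: prefix[level] = number of output bits consumed by all levels < level
  let pfx : List Int :=
    (PySem.List.pyRange 0 max_bit 1).foldl
      (fun (p : List Int) level =>
        p ++ [PySem.List.pyGetD p (-1) 0 +
          (((PySem.List.slice coord_bits none (some 3)).filter
              (fun cb => decide (level < cb))).length : Int)])
      [0]
  -- stage 2: dim-major placement at arithmetically derived positions
  (PySem.List.enumerate (PySem.List.slice coord_bits none (some 3)) 0).foldl
    (fun (code : Int) dc =>
      (PySem.List.pyRange 0 dc.2 1).foldl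
        (fun (code : Int) bit =>
          code + (PySem.Int.band ((PySem.List.pyGetD coords dc.1 0) >>> bit.toNat) 1) <<<
            (PySem.List.pyGetD pfx bit 0 +
              (((PySem.List.pyRange 0 dc.1 1).filter
                  (fun d => decide (bit < PySem.List.pyGetD coord_bits d 0))).length : Int)).toNat)
        code)
    0

-- ===== PRECONDITION & SPEC =====
-- Pre_ excludes exactly the inputs where Python A raises: ValueError on empty coord_bits, and
-- IndexError when the loop body indexes coord_bits (any positive level, needs length ≥ 3) or
-- coords (a dimension d < 3 with coord_bits[d] > 0 needs d < len(coords)).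
def Pre_compressed_z_index (coords : List Int) (coord_bits : List Int) : Prop :=
  coord_bits ≠ [] ∧
  ((∀ b ∈ coord_bits, b ≤ 0) ∨
   (3 ≤ coord_bits.length ∧
    (0 < coord_bits.getD 0 0 → 0 < coords.length) ∧
    (0 < coord_bits.getD 1 0 → 1 < coords.length) ∧
    (0 < coord_bits.getD 2 0 → 2 < coords.length)))
instance (coords : List Int) (coord_bits : List Int) : Decidable (Pre_compressed_z_index coords coord_bits) := by
  unfold Pre_compressed_z_index; infer_instance

def pvWitness_compressed_z_index : List Int × List Int := ([3, 5, 2], [2, 3, 2])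

def Spec_compressed_z_index (coords : List Int) (coord_bits : List Int) (out : Int) : Prop := out = compressed_z_index_alt coords coord_bits
instance (coords : List Int) (coord_bits : List Int) (out : Int) : Decidable (Spec_compressed_z_index coords coord_bits out) := by unfold Spec_compressed_z_index; infer_instance

-- ===== CLAIM (what is proved, stated in full; the proofs are below) =====
def Claim_equal_compressed_z_index : Prop := ∀ (coords : List Int) (coord_bits : List Int), Dom_compressed_z_index coords coord_bits → Pre_compressed_z_index coords coord_bits → Spec_compressed_z_index coords coord_bits (compressed_z_index coords coord_bits)

-- ===== LEMMAS AND PROOFS =====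

-- A's inner-loop body, with the placed bit value abstracted out.
def pvStep (cj : Int × Int) (v : Int) : Int × Int :=
  (PySem.Int.bor cj.1 (v <<< cj.2.toNat), cj.2 + 1)

-- little-endian value of a bit list (bits[0] is the least significant)
def pvLE (vs : List Int) : Int := vs.foldr (fun v acc => acc * 2 + v) 0

-- the interleaved bit list A walks through, in output order
def pvBits (coords : List Int) (coord_bits : List Int) (max_bit : Int) : List Int :=
  (PySem.List.pyRange 0 max_bit 1).flatMap (fun bit =>
    ((PySem.List.pyRange 0 3 1).filter
        (fun dim => decide (bit < PySem.List.pyGetD coord_bits dim 0))).map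
      (fun dim => PySem.Int.band ((PySem.List.pyGetD coords dim 0) >>> bit.toNat) 1))

-- Nat-indexed canonical views shared by both sides
def pvAct (cb : List Int) (bit d : Nat) : Bool := decide ((bit : Int) < cb.getD d 0)
def pvVal (coords : List Int) (bit d : Nat) : Int :=
  PySem.Int.band ((coords.getD d 0) >>> bit) 1
def pvCnt (cb : List Int) (bit : Nat) : Nat := (List.range 3).countP (pvAct cb bit)
def pvPref (cb : List Int) (bit : Nat) : Nat := ∑ l ∈ Finset.range bit, pvCnt cb l
def pvOff (cb : List Int) (bit d : Nat) : Nat := (List.range d).countP (pvAct cb bit)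

-- the canonical double sum both programs compute
def pvT (coords cb : List Int) (M : Nat) : Int :=
  ∑ bit ∈ Finset.range M, ∑ d ∈ Finset.range 3,
    if pvAct cb bit d then pvVal coords bit d * 2 ^ (pvPref cb bit + pvOff cb bit d) else 0

def pvBitsN (coords cb : List Int) (M : Nat) : List Int :=
  (List.range M).flatMap (fun bit =>
    ((List.range 3).filter (pvAct cb bit)).map (pvVal coords bit))

lemma pvBits_bounded (coords coord_bits : List Int) (max_bit : Int) :
    ∀ v ∈ pvBits coords coord_bits max_bit, 0 ≤ v ∧ v < 2 := by
  intro v hv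
  simp only [pvBits, List.mem_flatMap, List.mem_map, List.mem_filter] at hv
  obtain ⟨bit, _, dim, _, rfl⟩ := hv
  rw [PySem.Int.band_one]
  exact ⟨PySem.Int.mod_nonneg _ (by norm_num), PySem.Int.mod_lt _ (by norm_num)⟩

lemma pv_or_place (c j v : Int) (hc : 0 ≤ c) (hlt : c < 2 ^ j.toNat) (hv0 : 0 ≤ v) (hv1 : v < 2) :
    PySem.Int.bor c (v <<< j.toNat) = c + v * 2 ^ j.toNat := by
  interval_cases v
  · simp [Int.shiftLeft_eq]
  · rw [Int.shiftLeft_eq, one_mul,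
      PySem.Int.bor_of_nonneg hc (by positivity), Nat.lor_comm]
    have hpow : (2 : Int) ^ j.toNat = ((2 ^ j.toNat : Nat) : Int) := by push_cast; ring
    rw [hpow, Int.toNat_natCast]
    have hcn : c.toNat < 2 ^ j.toNat := by omega
    have h := Nat.two_pow_add_eq_or_of_lt hcn 1
    rw [mul_one] at h
    rw [← h]
    push_cast
    omega

lemma pv_fold_inv (vs : List Int) : ∀ (c j : Int),
    (∀ v ∈ vs, 0 ≤ v ∧ v < 2) → 0 ≤ c → 0 ≤ j → c < 2 ^ j.toNat →
    vs.foldl pvStep (c, j) = (c + 2 ^ j.toNat * pvLE vs, j + vs.length) := by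
  induction vs with
  | nil => intro c j _ _ _ _; simp [pvLE]
  | cons v vs ih =>
    intro c j hb hc hj hlt
    have hv := hb v (List.mem_cons_self ..)
    have hstep : pvStep (c, j) v = (c + v * 2 ^ j.toNat, j + 1) := by
      simp only [pvStep]
      rw [pv_or_place c j v hc hlt hv.1 hv.2]
    have hpow : (0 : Int) < 2 ^ j.toNat := by positivity
    have hmul : v * 2 ^ j.toNat ≤ 2 ^ j.toNat := by nlinarith [hv.1, hv.2]
    have hj1 : (j + 1).toNat = j.toNat + 1 := by omega
    have := ih (c + v * 2 ^ j.toNat) (j + 1)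
      (fun w hw => hb w (List.mem_cons_of_mem _ hw))
      (by nlinarith [hv.1]) (by omega)
      (by rw [hj1, pow_succ]; nlinarith)
    simp only [List.foldl_cons, hstep, this, hj1, pow_succ, pvLE, List.foldr_cons,
      Prod.mk.injEq, List.length_cons]
    refine ⟨by ring, by push_cast; omega⟩

lemma pvA_eq (coords coord_bits : List Int) :
    compressed_z_index coords coord_bits =
      pvLE (pvBits coords coord_bits ((PySem.List.max? coord_bits (fun x => x)).getD 0)) := by
  have key : ∀ init : Int × Int,
      (PySem.List.pyRange 0 ((PySem.List.max? coord_bits (fun x => x)).getD 0) 1).foldl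
        (fun (cj : Int × Int) bit =>
          (PySem.List.pyRange 0 3 1).foldl (fun (cj : Int × Int) dim =>
            if bit < PySem.List.pyGetD coord_bits dim 0 then
              (PySem.Int.bor cj.1
                 ((PySem.Int.band ((PySem.List.pyGetD coords dim 0) >>> bit.toNat) 1) <<< cj.2.toNat),
               cj.2 + 1)
            else cj) cj) init
      = (pvBits coords coord_bits ((PySem.List.max? coord_bits (fun x => x)).getD 0)).foldl pvStep init := by
    intro init
    rw [pvBits, List.flatMap_def, List.foldl_flatten, List.foldl_map]
    congr 1
    funext cj bit
    rw [List.foldl_map, ← PySem.List.foldl_ite_eq_foldl_filter]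
    simp only [pvStep]
  simp only [compressed_z_index]
  rw [key]
  rw [pv_fold_inv _ 0 0 (pvBits_bounded _ _ _) le_rfl le_rfl (by norm_num)]
  simp

lemma pvLE_append (xs ys : List Int) :
    pvLE (xs ++ ys) = pvLE xs + 2 ^ xs.length * pvLE ys := by
  induction xs with
  | nil => simp [pvLE]
  | cons x l ih =>
    simp only [pvLE, List.cons_append, List.foldr_cons, List.length_cons] at *
    rw [ih]; ring

lemma pvLE_filter_map (p : Nat → Bool) (v : Nat → Int) (n : Nat) :
    pvLE (((List.range n).filter p).map v) =
      ∑ d ∈ Finset.range n, if p d then v d * 2 ^ ((List.range d).countP p) else 0 := by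
  induction n with
  | zero => simp [pvLE]
  | succ n ih =>
    rw [List.range_succ, List.filter_append, List.map_append, pvLE_append,
      Finset.sum_range_succ, ih]
    by_cases h : p n
    · simp [h, pvLE, List.countP_eq_length_filter]; ring
    · simp [h, pvLE]

lemma pvBitsN_spec (coords cb : List Int) (M : Nat) :
    pvLE (pvBitsN coords cb M) = pvT coords cb M ∧
      (pvBitsN coords cb M).length = pvPref cb M := by
  induction M with
  | zero => simp [pvBitsN, pvT, pvPref, pvLE]
  | succ M ih =>
    have hsplit : pvBitsN coords cb (M + 1) =
        pvBitsN coords cb M ++ ((List.range 3).filter (pvAct cb M)).map (pvVal coords M) := by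
      simp [pvBitsN, List.range_succ]
    constructor
    · rw [hsplit, pvLE_append, ih.1, ih.2, pvLE_filter_map]
      conv_rhs => rw [pvT, Finset.sum_range_succ]
      rw [← pvT, Finset.mul_sum]
      congr 1
      refine Finset.sum_congr rfl (fun d _ => ?_)
      by_cases h : pvAct cb M d
      · simp only [h, if_true, pvOff, pow_add]; ring
      · simp [h]
    · rw [hsplit, List.length_append, ih.2]
      conv_rhs => rw [pvPref, Finset.sum_range_succ]
      rw [← pvPref]
      simp [pvCnt, List.countP_eq_length_filter]

lemma pvBits_eq_N (coords cb : List Int) (M : Nat) :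
    pvBits coords cb (M : Int) = pvBitsN coords cb M := by
  unfold pvBits pvBitsN
  have h3 : PySem.List.pyRange 0 3 1 = [0, 1, 2] := by decide
  rw [h3, PySem.List.pyRange_one]
  simp only [sub_zero, Int.toNat_natCast, List.flatMap_def, List.map_map]
  congr 1
  apply List.map_congr_left
  intro k _
  simp only [pvAct, List.range_succ, List.filter, PySem.List.pyGetD_ofNat',
    Function.comp, zero_add, List.range_zero, List.nil_append, List.cons_append,
    List.getD_eq_getElem?_getD]
  cases h0 : decide ((k : Int) < cb[0]?.getD 0) <;>
    cases h1 : decide ((k : Int) < cb[1]?.getD 0) <;>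
      cases h2 : decide ((k : Int) < cb[2]?.getD 0) <;>
        simp [pvVal, PySem.List.pyGetD_ofNat']

lemma pvCnt_eq (cb : List Int) (h3 : 3 ≤ cb.length) (b : Nat) :
    (((PySem.List.slice cb none (some 3)).filter
        (fun v => decide ((b : Int) < v))).length : Int) = (pvCnt cb b : Int) := by
  rcases cb with _ | ⟨x, _ | ⟨y, _ | ⟨z, t⟩⟩⟩ <;> simp at h3
  rw [PySem.List.slice_to _ (by norm_num)]
  norm_num [pvCnt, pvAct, List.range_succ, List.filter, List.countP,
    List.countP.go, List.getD_eq_getElem?_getD]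
  cases h0 : decide ((b : Int) < x) <;>
    cases h1 : decide ((b : Int) < y) <;>
      cases h2 : decide ((b : Int) < z) <;> simp [List.filter, h0, h1, h2]

lemma pvPfx (cb : List Int) (h3 : 3 ≤ cb.length) (M : Nat) :
    (PySem.List.pyRange 0 (M : Int) 1).foldl
      (fun (p : List Int) level =>
        p ++ [PySem.List.pyGetD p (-1) 0 +
          (((PySem.List.slice cb none (some 3)).filter
              (fun v => decide (level < v))).length : Int)])
      [0]
    = (List.range (M + 1)).map (fun b => (pvPref cb b : Int)) := by
  induction M with
  | zero =>
    rw [PySem.List.pyRange_one_eq_nil (by norm_num)]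
    simp [pvPref]
  | succ M ih =>
    have hM : ((M + 1 : Nat) : Int) = (M : Int) + 1 := by push_cast; ring
    rw [hM, PySem.List.pyRange_one_succ_right (by positivity), List.foldl_append, ih]
    have hsplit : (List.range (M + 1)).map (fun b => (pvPref cb b : Int)) =
        (List.range M).map (fun b => (pvPref cb b : Int)) ++ [(pvPref cb M : Int)] := by
      simp [List.range_succ]
    simp only [List.foldl_cons, List.foldl_nil, hsplit, PySem.List.pyGetD_neg_one_append_singleton]
    rw [List.append_assoc]
    rw [pvCnt_eq cb h3 M]
    have : (pvPref cb M : Int) + (pvCnt cb M : Int) = (pvPref cb (M + 1) : Int) := by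
      push_cast [pvPref, Finset.sum_range_succ]; ring
    rw [this]
    simp [List.range_succ]

lemma pvOff_eq (cb : List Int) (d b : Nat) :
    ((((PySem.List.pyRange 0 (d : Int) 1).filter
        (fun j => decide ((b : Int) < PySem.List.pyGetD cb j 0))).length : Int)) = (pvOff cb b d : Int) := by
  rw [PySem.List.pyRange_one]
  simp only [sub_zero, Int.toNat_natCast, zero_add, List.filter_map, List.length_map,
    pvOff, List.countP_eq_length_filter, Nat.cast_inj]
  apply congrArg List.length
  apply List.filter_congr
  intro j _
  simp [pvAct, Function.comp, PySem.List.pyGetD_natCast]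

lemma sum_ite_range (f : Nat → Int) (K M : Nat) (hKM : K ≤ M) (p : Nat → Bool)
    (hp : ∀ b, p b = decide (b < K)) :
    ∑ b ∈ Finset.range M, (if p b then f b else 0) = ∑ b ∈ Finset.range K, f b := by
  have h1 : ∑ b ∈ Finset.range K, (if p b then f b else 0)
      = ∑ b ∈ Finset.range M, (if p b then f b else 0) :=
    Finset.sum_subset (by intro x hx; simp [Finset.mem_range] at *; omega)
      (fun x hx hnx => by
        simp [Finset.mem_range] at hx hnx
        have hxK : ¬ x < K := by omega
        simp [hp, hxK])
  rw [← h1]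
  exact Finset.sum_congr rfl (fun b hb => by
    simp [Finset.mem_range] at hb
    simp [hp, hb])

lemma pyRange_zero_cast (n : Nat) :
    PySem.List.pyRange 0 (n : Int) 1 = (List.range n).map (fun k : Nat => (k : Int)) := by
  rw [PySem.List.pyRange_one]
  norm_num

lemma sum_map_range_int (f : Nat → Int) (n : Nat) :
    ((List.range n).map f).sum = ∑ i ∈ Finset.range n, f i := by
  induction n with
  | zero => simp
  | succ n ih => simp [List.range_succ, Finset.sum_range_succ, ih]

lemma pvInner (coords cb : List Int) (M : Nat) (d : Nat) (dI : Int)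
    (hdI : dI = (d : Int)) (cbd : Int) (hle : cbd ≤ (M : Int))
    (hact : ∀ b : Nat, pvAct cb b d = decide ((b : Int) < cbd)) (code : Int) :
    (PySem.List.pyRange 0 cbd 1).foldl
      (fun (code : Int) bit =>
        code + (PySem.Int.band ((PySem.List.pyGetD coords dI 0) >>> bit.toNat) 1) <<<
          (PySem.List.pyGetD ((List.range (M + 1)).map (fun b => (pvPref cb b : Int))) bit 0 +
            (((PySem.List.pyRange 0 dI 1).filter
                (fun j => decide (bit < PySem.List.pyGetD cb j 0))).length : Int)).toNat)
      code
    = code + ∑ b ∈ Finset.range M,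
        (if pvAct cb b d then pvVal coords b d * 2 ^ (pvPref cb b + pvOff cb b d) else 0) := by
  rw [PySem.List.foldl_add, sum_ite_range _ cbd.toNat M (by omega) _
    (fun b => by rw [hact]; simp only [decide_eq_decide]; omega)]
  congr 1
  rcases (by omega : cbd ≤ 0 ∨ 0 < cbd) with hc | hc
  · rw [PySem.List.pyRange_one_eq_nil hc]
    have : cbd.toNat = 0 := by omega
    simp [this]
  · have hK : cbd = ((cbd.toNat : Nat) : Int) := by omega
    rw [hK, pyRange_zero_cast, List.map_map, sum_map_range_int]
    simp only [Int.toNat_natCast]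
    refine Finset.sum_congr rfl (fun b hb => ?_)
    simp only [Finset.mem_range] at hb
    have hbM : b < M + 1 := by omega
    simp only [Function.comp, Int.toNat_natCast, hdI,
      PySem.List.pyGetD_natCast, PySem.List.getD_map_range _ _ _ _ hbM, pvOff_eq]
    have htn : ((pvPref cb b : Int) + (pvOff cb b d : Int)).toNat = pvPref cb b + pvOff cb b d := by
      omega
    rw [htn, Int.shiftLeft_eq, pvVal, List.getD_eq_getElem?_getD]
    simp [Int.shiftRight_natCast_right]

lemma pvB_eq (coords : List Int) (x y z : Int) (t : List Int) (M : Nat)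
    (hmax : (PySem.List.max? (x :: y :: z :: t) (fun v => v)).getD 0 = (M : Int))
    (hx : x ≤ (M : Int)) (hy : y ≤ (M : Int)) (hz : z ≤ (M : Int)) :
    compressed_z_index_alt coords (x :: y :: z :: t) = pvT coords (x :: y :: z :: t) M := by
  simp only [compressed_z_index_alt]
  rw [hmax, pvPfx _ (by simp) M, PySem.List.slice_to _ (by norm_num)]
  simp only [show ((3 : Int)).toNat = 3 from rfl, List.take_succ_cons, List.take_zero,
    PySem.List.enumerate_cons, PySem.List.enumerate_nil, List.foldl_cons, List.foldl_nil,
    show (0 : Int) + 1 = 1 from rfl, show (1 : Int) + 1 = 2 from rfl]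
  rw [pvInner coords _ M 0 0 (by norm_num) x hx (fun b => by simp [pvAct]) 0,
    pvInner coords _ M 1 1 (by norm_num) y hy (fun b => by simp [pvAct]) _,
    pvInner coords _ M 2 2 (by norm_num) z hz (fun b => by simp [pvAct]) _]
  have hT : pvT coords (x :: y :: z :: t) M =
      (∑ b ∈ Finset.range M, (if pvAct (x :: y :: z :: t) b 0 then
          pvVal coords b 0 * 2 ^ (pvPref (x :: y :: z :: t) b + pvOff (x :: y :: z :: t) b 0) else 0))
      + (∑ b ∈ Finset.range M, (if pvAct (x :: y :: z :: t) b 1 then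
          pvVal coords b 1 * 2 ^ (pvPref (x :: y :: z :: t) b + pvOff (x :: y :: z :: t) b 1) else 0))
      + (∑ b ∈ Finset.range M, (if pvAct (x :: y :: z :: t) b 2 then
          pvVal coords b 2 * 2 ^ (pvPref (x :: y :: z :: t) b + pvOff (x :: y :: z :: t) b 2) else 0)) := by
    simp only [pvT, Finset.sum_range_succ, Finset.sum_range_zero, zero_add,
      Finset.sum_add_distrib]
  rw [hT]
  ring

lemma pvFoldl_id {α : Type} (l : List α) (f : Int → α → Int) (c : Int)
    (h : ∀ (c : Int), ∀ x ∈ l, f c x = c) : l.foldl f c = c := by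
  induction l generalizing c with
  | nil => rfl
  | cons a l ih =>
    rw [List.foldl_cons, h c a (List.mem_cons_self ..)]
    exact ih c (fun c x hx => h c x (List.mem_cons_of_mem _ hx))

lemma pvSnd_mem_enumerate {α : Type} (xs : List α) (s : Int) (p : Int × α)
    (hp : p ∈ PySem.List.enumerate xs s) : p.2 ∈ xs := by
  rw [PySem.List.mem_enumerate_iff] at hp
  obtain ⟨k, hk, rfl⟩ := hp
  exact List.getElem_mem hk

theorem pvMain (coords cb : List Int) (hpre : Pre_compressed_z_index coords cb) :
    pvLE (pvBits coords cb ((PySem.List.max? cb (fun v => v)).getD 0)) =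
      compressed_z_index_alt coords cb := by
  unfold Pre_compressed_z_index at hpre
  obtain ⟨hne, hbr⟩ := hpre
  obtain ⟨mx, hmx⟩ : ∃ mx, PySem.List.max? cb (fun v => v) = some mx := by
    cases h : PySem.List.max? cb (fun v => v) with
    | none => exact absurd ((PySem.List.max?_eq_none_iff cb _).1 h) hne
    | some m => exact ⟨m, rfl⟩
  have hgd : (PySem.List.max? cb (fun v => v)).getD 0 = mx := by rw [hmx]; rfl
  have hmax : ∀ v ∈ cb, v ≤ mx := PySem.List.max?_isMax hmx
  by_cases hm : mx ≤ 0
  · -- no level is active: both sides are 0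
    rw [hgd, pvBits, PySem.List.pyRange_one_eq_nil hm]
    simp only [List.flatMap_nil, pvLE, List.foldr_nil]
    simp only [compressed_z_index_alt, hgd, PySem.List.pyRange_one_eq_nil hm, List.foldl_nil]
    refine (pvFoldl_id _ _ _ (fun c p hp => ?_)).symm
    have hv : p.2 ≤ 0 :=
      le_trans (hmax _ (PySem.List.mem_of_mem_slice _ _ _ (pvSnd_mem_enumerate _ _ _ hp))) hm
    rw [PySem.List.pyRange_one_eq_nil hv, List.foldl_nil]
  · have h3 : 3 ≤ cb.length := by
      rcases hbr with hall | h
      · exact absurd (hall mx (PySem.List.max?_mem hmx)) hm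
      · exact h.1
    rcases cb with _ | ⟨X, _ | ⟨Y, _ | ⟨Z, T⟩⟩⟩ <;> simp at h3
    set M : Nat := mx.toNat with hMdef
    have hmM : mx = (M : Int) := by omega
    rw [hgd, hmM, pvBits_eq_N, (pvBitsN_spec coords _ M).1]
    rw [pvB_eq coords X Y Z T M (by rw [hgd, hmM]) (by rw [← hmM]; exact hmax _ (by simp))
      (by rw [← hmM]; exact hmax _ (by simp)) (by rw [← hmM]; exact hmax _ (by simp))]

-- ===== VERDICT (by name: the statement is the Claim_ definition above) =====
theorem compressed_z_index_spec : Claim_equal_compressed_z_index := by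
  intro coords coord_bits _ hpre
  unfold Spec_compressed_z_index
  rw [pvA_eq]
  exact pvMain coords coord_bits hpre
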